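-- pv_equiv track=rewrite | github.com/boyentenbi/neural-transcriber | model/decoder/n_gram_words.py | gen_poss_grams
-- ===== SOURCE A (Python) =====
-- from copy import deepcopy
--
-- def gen_poss_grams(word_list, max_n):
--     poss_keys = deepcopy(word_list)
--     for i in range(max_n-1):
--         new_keys = []
--         for key in poss_keys:
--             new_keys.extend([(key + x) for x in ([(" " + word) for word in word_list] + [""])])
--
--         poss_keys.extend(new_keys)
--
--     return {key: 0 for key in poss_keys}
-- ===== SOURCE B (Python) =====
-- def gen_poss_grams(word_list, max_n):
--     result = {}
--     frontier = []
--     for w in word_list: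
--         if w not in result:
--             result[w] = 0
--             frontier.append(w)
--     for _ in range(max_n - 1):
--         new_frontier = []
--         for g in frontier:
--             for w in word_list:
--                 s = g + " " + w
--                 if s not in result:
--                     result[s] = 0
--                     new_frontier.append(s)
--         frontier = new_frontier
--     return result
-- ===== Notes on version B (the rewrite author's own statement) =====
-- stated objective: faster
-- what changed: A re-extends every accumulated key each round (the '' suffix also duplicating every key), growing an exponentially redundant list before a final dict dedup; B keeps a seen-dict and a frontier of the round's newly discovered distinct grams and extends only that frontier, deduplicating on the fly.
import Mathlib
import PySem

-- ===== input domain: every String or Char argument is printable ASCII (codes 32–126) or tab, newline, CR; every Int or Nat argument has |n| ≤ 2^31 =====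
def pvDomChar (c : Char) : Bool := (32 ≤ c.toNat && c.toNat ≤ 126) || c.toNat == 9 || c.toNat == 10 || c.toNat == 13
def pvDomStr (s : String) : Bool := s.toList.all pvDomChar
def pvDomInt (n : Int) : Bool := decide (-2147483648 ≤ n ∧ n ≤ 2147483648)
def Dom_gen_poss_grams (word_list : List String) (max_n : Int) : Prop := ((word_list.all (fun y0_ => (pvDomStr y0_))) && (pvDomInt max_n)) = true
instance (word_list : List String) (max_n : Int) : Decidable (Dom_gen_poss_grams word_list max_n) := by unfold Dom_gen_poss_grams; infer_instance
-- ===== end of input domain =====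

-- B replaces A's re-extension of EVERY accumulated key each round (exponential duplicate blow-up)
-- by extending only the round's newly-discovered distinct grams, deduplicating on the fly; same dict, faster.

-- ===== PORT A =====
-- one iteration of A's outer loop: build new_keys by extending every key, then extend poss_keys
def pvAStep (word_list : List String) (poss_keys : List String) : List String :=
  poss_keys ++
    poss_keys.foldl
      (fun new_keys key =>
        new_keys ++ ((word_list.map (fun word => " " ++ word)) ++ [""]).map (fun x => key ++ x))
      []

def gen_poss_grams (word_list : List String) (max_n : Int) : List (String × Int) :=
  let poss_keys := word_list
  let poss_keys := (PySem.List.pyRange 0 (max_n - 1) 1).foldl (fun pk _ => pvAStep word_list pk) poss_keys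
  (poss_keys.foldl (fun d key => d.insert key 0) (PySem.Dict.empty : PySem.Dict String Int)).items

-- ===== PORT B =====
-- "if s not in result: result[s] = 0; frontier.append(s)" on the state (result, frontier)
def pvBInsert (st : PySem.Dict String Int × List String) (s : String) :
    PySem.Dict String Int × List String :=
  if st.1.contains s then st else (st.1.insert s 0, st.2 ++ [s])

-- one iteration of B's outer loop: extend only the current frontier
def pvBStep (word_list : List String) (st : PySem.Dict String Int × List String) :
    PySem.Dict String Int × List String :=
  st.2.foldl
    (fun st2 g => word_list.foldl (fun st3 w => pvBInsert st3 (g ++ " " ++ w)) st2)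
    (st.1, [])

def gen_poss_grams_alt (word_list : List String) (max_n : Int) : List (String × Int) :=
  let init := word_list.foldl (fun st w => pvBInsert st w)
    ((PySem.Dict.empty : PySem.Dict String Int), ([] : List String))
  ((PySem.List.pyRange 0 (max_n - 1) 1).foldl (fun st _ => pvBStep word_list st) init).1.items

-- ===== PRECONDITION & SPEC =====
def Spec_gen_poss_grams (word_list : List String) (max_n : Int) (out : List (String × Int)) : Prop := out = gen_poss_grams_alt word_list max_n
instance (word_list : List String) (max_n : Int) (out : List (String × Int)) : Decidable (Spec_gen_poss_grams word_list max_n out) := by unfold Spec_gen_poss_grams; infer_instance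

-- ===== CLAIM (what is proved, stated in full; the proofs are below) =====
def Claim_equal_gen_poss_grams : Prop := ∀ (word_list : List String) (max_n : Int), Dom_gen_poss_grams word_list max_n → Spec_gen_poss_grams word_list max_n (gen_poss_grams word_list max_n)

-- ===== LEMMAS AND PROOFS =====

-- ordered first-occurrence accumulation: fold "append if new" over a stream
def pvAdd (a : List String) (x : String) : List String := if x ∈ a then a else a ++ [x]
def pvAddAll (X Y : List String) : List String := Y.foldl pvAdd X
-- the keys a stream Y newly appends onto X
def pvNew (X Y : List String) : List String := (pvAddAll X Y).drop X.length
-- the space-separated extensions of one gram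
def pvExt (word_list : List String) (s : String) : List String :=
  word_list.map (fun w => s ++ " " ++ w)
-- A's extension block for one key (extensions plus the key itself, from the "" suffix)
def pvBlk (word_list : List String) (s : String) : List String := pvExt word_list s ++ [s]

theorem pvAddAll_cons (X : List String) (y : String) (Y : List String) :
    pvAddAll X (y :: Y) = pvAddAll (pvAdd X y) Y := rfl

theorem pvAddAll_append (X Y Z : List String) :
    pvAddAll X (Y ++ Z) = pvAddAll (pvAddAll X Y) Z := List.foldl_append

theorem pvAddAll_prefix (Y : List String) : ∀ X : List String, ∃ t, pvAddAll X Y = X ++ t := by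
  induction Y with
  | nil => exact fun X => ⟨[], by simp [pvAddAll]⟩
  | cons y Y ih =>
    intro X
    rw [pvAddAll_cons]
    by_cases hy : y ∈ X
    · rw [show pvAdd X y = X from if_pos hy]; exact ih X
    · rw [show pvAdd X y = X ++ [y] from if_neg hy]
      rcases ih (X ++ [y]) with ⟨t, ht⟩
      exact ⟨y :: t, by simpa using ht⟩

theorem mem_pvAddAll (Y : List String) : ∀ (X : List String) (a : String),
    a ∈ pvAddAll X Y ↔ a ∈ X ∨ a ∈ Y := by
  induction Y with
  | nil => simp [pvAddAll]
  | cons y Y ih =>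
    intro X a
    rw [pvAddAll_cons, ih]
    by_cases hy : y ∈ X
    · rw [show pvAdd X y = X from if_pos hy]
      constructor
      · rintro (h | h)
        · exact Or.inl h
        · exact Or.inr (by simp [h])
      · rintro (h | h)
        · exact Or.inl h
        · rcases List.mem_cons.mp h with h | h
          · exact Or.inl (h ▸ hy)
          · exact Or.inr h
    · rw [show pvAdd X y = X ++ [y] from if_neg hy]
      simp [List.mem_cons]
      tauto

theorem pvAddAll_eq_self (Y : List String) : ∀ X : List String,
    (∀ y ∈ Y, y ∈ X) → pvAddAll X Y = X := by
  induction Y with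
  | nil => intro X _; rfl
  | cons y Y ih =>
    intro X h
    rw [pvAddAll_cons, show pvAdd X y = X from if_pos (h y (by simp))]
    exact ih X fun z hz => h z (by simp [hz])

theorem pvNew_cons (X : List String) (y : String) (Y : List String) :
    pvNew X (y :: Y) = if y ∈ X then pvNew X Y else y :: pvNew (X ++ [y]) Y := by
  unfold pvNew
  rw [pvAddAll_cons]
  by_cases hy : y ∈ X
  · rw [show pvAdd X y = X from if_pos hy, if_pos hy]
  · rw [show pvAdd X y = X ++ [y] from if_neg hy, if_neg hy]
    rcases pvAddAll_prefix Y (X ++ [y]) with ⟨t, ht⟩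
    rw [ht, show X ++ [y] ++ t = X ++ (y :: t) by simp, List.drop_left]
    congr 1
    rw [show X ++ y :: t = (X ++ [y]) ++ t by simp, List.drop_left]

-- core: extending the whole stream N is, up to first-occurrence accumulation from Z,
-- the same as extending only the keys N newly contributes beyond X
theorem pvFlatMapNew (wl : List String) : ∀ (N X Z : List String),
    (∀ s ∈ X, ∀ t ∈ pvBlk wl s, t ∈ Z) → (∀ s ∈ N, s ∈ Z) →
    pvAddAll Z (N.flatMap (pvBlk wl)) = pvAddAll Z ((pvNew X N).flatMap (pvExt wl)) := by
  intro N
  induction N with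
  | nil => intro X Z _ _; simp [pvNew, pvAddAll]
  | cons n N ih =>
    intro X Z hX hN
    rw [List.flatMap_cons, pvAddAll_append, pvNew_cons]
    by_cases hn : n ∈ X
    · rw [if_pos hn, pvAddAll_eq_self _ _ (hX n hn)]
      exact ih X Z hX fun s hs => hN s (by simp [hs])
    · rw [if_neg hn, List.flatMap_cons, pvAddAll_append]
      have hblk : pvAddAll Z (pvBlk wl n) = pvAddAll Z (pvExt wl n) := by
        unfold pvBlk
        rw [pvAddAll_append]
        exact pvAddAll_eq_self _ _ (by
          intro y hy
          simp only [List.mem_singleton] at hy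
          rw [hy]
          exact (mem_pvAddAll _ _ _).mpr (Or.inl (hN n (by simp))))
      rw [hblk]
      apply ih (X ++ [n]) (pvAddAll Z (pvExt wl n))
      · intro s hs t ht
        rcases List.mem_append.mp hs with hs | hs
        · exact (mem_pvAddAll _ _ _).mpr (Or.inl (hX s hs t ht))
        · simp only [List.mem_singleton] at hs
          rw [hs] at ht
          unfold pvBlk at ht
          rcases List.mem_append.mp ht with ht | ht
          · exact (mem_pvAddAll _ _ _).mpr (Or.inr ht)
          · simp only [List.mem_singleton] at ht
            rw [ht]
            exact (mem_pvAddAll _ _ _).mpr (Or.inl (hN n (by simp)))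
      · exact fun s hs => (mem_pvAddAll _ _ _).mpr (Or.inl (hN s (by simp [hs])))

-- a dict with items K.map (·, 0) answers contains by membership in K
theorem pv_contains_of_items (d : PySem.Dict String Int) (K : List String)
    (h : d.items = K.map (fun k => (k, (0:Int)))) (s : String) :
    d.contains s = decide (s ∈ K) := by
  rw [PySem.Dict.contains_eq_decide_mem_keys]
  have hk : d.keys = K := by
    show d.items.map (·.1) = K
    rw [h, List.map_map]
    simp only [Function.comp_def]
    simp
  rw [hk]

-- A's final dict comprehension: folding insert over a stream accumulates first occurrences
theorem pvDictFold : ∀ (P K : List String) (d : PySem.Dict String Int),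
    d.items = K.map (fun k => (k, (0:Int))) →
    (P.foldl (fun d key => d.insert key 0) d).items
      = (pvAddAll K P).map (fun k => (k, (0:Int))) := by
  intro P
  induction P with
  | nil => intro K d h; exact h
  | cons p P ih =>
    intro K d h
    show ((P.foldl _ (d.insert p 0))).items = (pvAddAll (pvAdd K p) P).map _
    by_cases hp : p ∈ K
    · have hc : d.contains p = true := by rw [pv_contains_of_items d K h]; simpa
      have hi : (d.insert p 0).items = K.map (fun k => (k, (0:Int))) := by
        rw [PySem.Dict.items_insert_of_contains _ _ hc, h, List.map_map]
        apply List.map_congr_left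
        intro a _
        by_cases hap : a = p <;> simp [Function.comp, hap]
      rw [ih K _ hi, show pvAdd K p = K from if_pos hp]
    · have hc : d.contains p = false := by rw [pv_contains_of_items d K h]; simpa
      have hi : (d.insert p 0).items = (K ++ [p]).map (fun k => (k, (0:Int))) := by
        rw [PySem.Dict.items_insert_of_not_contains _ _ hc, h]; simp
      rw [ih (K ++ [p]) _ hi, show pvAdd K p = K ++ [p] from if_neg hp]

-- B's guarded-insert fold over a stream: the dict accumulates first occurrences, the
-- frontier accumulator collects exactly the newly appended keys
theorem pvPairFold : ∀ (Y K acc : List String) (d : PySem.Dict String Int),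
    d.items = K.map (fun k => (k, (0:Int))) →
    (Y.foldl pvBInsert (d, acc)).1.items = (pvAddAll K Y).map (fun k => (k, (0:Int)))
      ∧ (Y.foldl pvBInsert (d, acc)).2 = acc ++ pvNew K Y := by
  intro Y
  induction Y with
  | nil => intro K acc d h; exact ⟨h, by simp [pvNew, pvAddAll]⟩
  | cons y Y ih =>
    intro K acc d h
    rw [List.foldl_cons, pvAddAll_cons, pvNew_cons]
    by_cases hy : y ∈ K
    · have hc : d.contains y = true := by rw [pv_contains_of_items d K h]; simpa
      rw [show pvBInsert (d, acc) y = (d, acc) by simp [pvBInsert, hc],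
          show pvAdd K y = K from if_pos hy, if_pos hy]
      exact ih K acc d h
    · have hc : d.contains y = false := by rw [pv_contains_of_items d K h]; simpa
      rw [show pvBInsert (d, acc) y = (d.insert y 0, acc ++ [y]) by simp [pvBInsert, hc],
          show pvAdd K y = K ++ [y] from if_neg hy, if_neg hy]
      have h' : (d.insert y 0).items = (K ++ [y]).map (fun k => (k, (0:Int))) := by
        rw [PySem.Dict.items_insert_of_not_contains _ _ hc, h]; simp
      rcases ih (K ++ [y]) (acc ++ [y]) _ h' with ⟨h1, h2⟩
      exact ⟨h1, by rw [h2]; simp⟩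

-- A's inner foldl builds exactly the flatMap of extension blocks
theorem pvAStep_eq (wl P : List String) :
    pvAStep wl P = P ++ P.flatMap (pvBlk wl) := by
  unfold pvAStep
  rw [PySem.List.foldl_append_eq_flatMap]
  rw [List.nil_append]
  congr 1
  apply List.flatMap_congr
  intro key _
  unfold pvBlk pvExt
  simp [List.map_map, Function.comp, String.append_empty, String.append_assoc]

-- B's nested frontier/word loops are the guarded-insert fold over the flatMap of extensions
theorem pvBStep_eq (wl : List String) (st : PySem.Dict String Int × List String) :
    pvBStep wl st = (st.2.flatMap (pvExt wl)).foldl pvBInsert (st.1, []) := by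
  unfold pvBStep
  rw [List.foldl_flatMap]
  congr 1
  funext st2 g
  unfold pvExt
  rw [List.foldl_map]

-- the outer-loop invariant, carried through both folds simultaneously
theorem pvMain (wl : List String) : ∀ (L : List Int) (P X : List String)
    (d : PySem.Dict String Int) (f : List String),
    d.items = (pvAddAll [] P).map (fun k => (k, (0:Int))) →
    f = pvNew X P →
    (∀ s ∈ X, ∀ t ∈ pvBlk wl s, t ∈ pvAddAll [] P) →
    (L.foldl (fun st _ => pvBStep wl st) (d, f)).1.items
      = (pvAddAll [] (L.foldl (fun P _ => pvAStep wl P) P)).map (fun k => (k, (0:Int))) := by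
  intro L
  induction L with
  | nil => intro P X d f h _ _; exact h
  | cons i L ih =>
    intro P X d f h hf hX
    show (L.foldl (fun st _ => pvBStep wl st) (pvBStep wl (d, f))).1.items
        = (pvAddAll [] (L.foldl (fun P _ => pvAStep wl P) (pvAStep wl P))).map (fun k => (k, (0:Int)))
    have hmemP : ∀ s ∈ P, s ∈ pvAddAll [] P :=
      fun s hs => (mem_pvAddAll _ _ _).mpr (Or.inr hs)
    have hA' : pvAddAll (pvAddAll [] P) (P.flatMap (pvBlk wl))
        = pvAddAll (pvAddAll [] P) (f.flatMap (pvExt wl)) := by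
      rw [hf]
      exact pvFlatMapNew wl P X (pvAddAll [] P) hX hmemP
    have hA : pvAddAll [] (pvAStep wl P)
        = pvAddAll (pvAddAll [] P) (f.flatMap (pvExt wl)) := by
      rw [pvAStep_eq, pvAddAll_append]
      exact hA'
    have hpair := pvPairFold (f.flatMap (pvExt wl)) (pvAddAll [] P) [] d h
    have hg1 : (pvBStep wl (d, f)).1.items
        = (pvAddAll [] (pvAStep wl P)).map (fun k => (k, (0:Int))) := by
      rw [pvBStep_eq, hA]
      exact hpair.1
    have hg2 : (pvBStep wl (d, f)).2 = pvNew (pvAddAll [] P) (pvAStep wl P) := by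
      rw [pvBStep_eq, hpair.2, List.nil_append]
      unfold pvNew
      congr 1
      rw [pvAStep_eq, pvAddAll_append, pvAddAll_eq_self P (pvAddAll [] P) hmemP]
      exact hA'.symm
    have hg3 : ∀ s ∈ pvAddAll [] P, ∀ t ∈ pvBlk wl s, t ∈ pvAddAll [] (pvAStep wl P) := by
      intro s hs t ht
      rw [pvAStep_eq, pvAddAll_append]
      have hsP : s ∈ P := by
        rcases (mem_pvAddAll _ _ _).mp hs with h' | h'
        · simp at h'
        · exact h'
      exact (mem_pvAddAll _ _ _).mpr (Or.inr (List.mem_flatMap.mpr ⟨s, hsP, ht⟩))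
    exact ih (pvAStep wl P) (pvAddAll [] P) _ _ hg1 hg2 hg3

-- ===== VERDICT (by name: the statement is the Claim_ definition above) =====
theorem gen_poss_grams_spec : Claim_equal_gen_poss_grams := by
  intro word_list max_n _
  show gen_poss_grams word_list max_n = gen_poss_grams_alt word_list max_n
  unfold gen_poss_grams gen_poss_grams_alt
  have hinit := pvPairFold word_list [] [] PySem.Dict.empty rfl
  rw [pvDictFold _ [] PySem.Dict.empty rfl]
  exact (pvMain word_list (PySem.List.pyRange 0 (max_n - 1) 1) word_list []
    _ _ hinit.1 (hinit.2.trans (List.nil_append _)) (by simp)).symm
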